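-- pv_equiv track=rewrite | github.com/underpass-ai/swe-ai-fleet | e2e/tests/37-workspace-git-lifecycle/test_workspace_git_lifecycle.py | _resolve_base_branch
-- ===== SOURCE A (Python) =====
-- from typing import Any
--
-- def _resolve_base_branch(branches: list[dict[str, Any]]) -> str:
--     for item in branches:
--         if bool(item.get("current")):
--             name = str(item.get("name", "")).strip()
--             if name:
--                 return name
--     for item in branches:
--         name = str(item.get("name", "")).strip()
--         if name:
--             return name
--     raise RuntimeError("could not resolve base branch from branch list")
-- ===== SOURCE B (Python) =====
-- def _resolve_base_branch(branches: list[dict[str, object]]) -> str: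
--     fallback = None
--     for item in branches:
--         name = str(item.get("name", "")).strip()
--         if bool(item.get("current")) and name:
--             return name
--         if name and fallback is None:
--             fallback = name
--     if fallback is not None:
--         return fallback
--     raise RuntimeError("could not resolve base branch from branch list")
-- ===== Notes on version B (the rewrite author's own statement) =====
-- stated objective: simpler
-- what changed: Replaces A's two full passes over the branch list by a single loop that returns immediately on the first current branch with a non-empty name while remembering the first non-empty name as a fallback.
import Mathlib
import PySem

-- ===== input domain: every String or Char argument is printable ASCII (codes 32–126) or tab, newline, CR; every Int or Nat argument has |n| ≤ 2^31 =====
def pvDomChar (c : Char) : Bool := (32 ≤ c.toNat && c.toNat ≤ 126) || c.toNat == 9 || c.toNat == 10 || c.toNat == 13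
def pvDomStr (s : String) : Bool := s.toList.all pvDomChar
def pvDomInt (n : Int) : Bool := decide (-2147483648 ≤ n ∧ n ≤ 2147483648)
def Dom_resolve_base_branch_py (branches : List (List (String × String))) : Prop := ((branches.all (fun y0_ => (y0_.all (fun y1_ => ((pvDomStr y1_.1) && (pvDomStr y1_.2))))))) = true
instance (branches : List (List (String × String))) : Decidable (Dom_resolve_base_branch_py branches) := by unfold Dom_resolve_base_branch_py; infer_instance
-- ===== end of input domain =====

-- B replaces A's two passes by a single loop with a fallback variable; objective: simpler.
-- A raises RuntimeError when no branch has a non-empty stripped name; Pre_ excludes those inputs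
-- (both ports return "" there, an arbitrary value outside the claim).

-- ===== PORT A =====
-- first loop of A: return the name of the first truthy-"current" item with a non-empty stripped name
def pvALoop1 : List (List (String × String)) → Option String
  | [] => none
  | item :: rest =>
    if ((PySem.Dict.mk item).get? "current").getD "" ≠ "" then
      let name := PySem.Str.strip (((PySem.Dict.mk item).get? "name").getD "")
      if name ≠ "" then some name else pvALoop1 rest
    else pvALoop1 rest

-- second loop of A: first non-empty stripped name
def pvALoop2 : List (List (String × String)) → Option String
  | [] => none
  | item :: rest =>
    let name := PySem.Str.strip (((PySem.Dict.mk item).get? "name").getD "")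
    if name ≠ "" then some name else pvALoop2 rest

def resolve_base_branch_py (branches : List (List (String × String))) : String :=
  match pvALoop1 branches with
  | some n => n
  | none =>
    match pvALoop2 branches with
    | some n => n
    | none => ""   -- Python raises RuntimeError here; excluded by Pre_

-- ===== PORT B =====
-- single loop with a fallback accumulator (initially none)
def pvBLoop : List (List (String × String)) → Option String → String
  | [], fallback => fallback.getD ""   -- Python raises RuntimeError when fallback is None; excluded by Pre_
  | item :: rest, fallback =>
    let name := PySem.Str.strip (((PySem.Dict.mk item).get? "name").getD "")
    if ((PySem.Dict.mk item).get? "current").getD "" ≠ "" ∧ name ≠ "" then name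
    else pvBLoop rest (if name ≠ "" ∧ fallback = none then some name else fallback)

def resolve_base_branch_py_alt (branches : List (List (String × String))) : String :=
  pvBLoop branches none

-- ===== PRECONDITION & SPEC =====
-- Pre_: some branch has a non-empty stripped "name"; otherwise Python A (and B) raise RuntimeError.
def Pre_resolve_base_branch_py (branches : List (List (String × String))) : Prop :=
  ∃ item ∈ branches, PySem.Str.strip (((PySem.Dict.mk item).get? "name").getD "") ≠ ""
instance (branches : List (List (String × String))) : Decidable (Pre_resolve_base_branch_py branches) := by unfold Pre_resolve_base_branch_py; infer_instance

def pvWitness_resolve_base_branch_py : (List (List (String × String))) := [[("name", "main")]]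

def Spec_resolve_base_branch_py (branches : List (List (String × String))) (out : String) : Prop := out = resolve_base_branch_py_alt branches
instance (branches : List (List (String × String))) (out : String) : Decidable (Spec_resolve_base_branch_py branches out) := by unfold Spec_resolve_base_branch_py; infer_instance

-- ===== CLAIM (what is proved, stated in full; the proofs are below) =====
def Claim_equal_resolve_base_branch_py : Prop := ∀ (branches : List (List (String × String))), Dom_resolve_base_branch_py branches → Pre_resolve_base_branch_py branches → Spec_resolve_base_branch_py branches (resolve_base_branch_py branches)

-- ===== LEMMAS AND PROOFS =====

-- if A's first loop finds a name, B returns it regardless of the fallback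
theorem pvBLoop_of_loop1_some (branches : List (List (String × String))) (n : String)
    (h : pvALoop1 branches = some n) : ∀ fb, pvBLoop branches fb = n := by
  induction branches with
  | nil => simp [pvALoop1] at h
  | cons item rest ih =>
    intro fb
    simp only [pvALoop1] at h
    simp only [pvBLoop]
    by_cases hc : ((PySem.Dict.mk item).get? "current").getD "" ≠ ""
    · by_cases hn : PySem.Str.strip (((PySem.Dict.mk item).get? "name").getD "") ≠ ""
      · simp only [if_pos hc, if_pos hn] at h
        simp only [if_pos (And.intro hc hn)]
        exact Option.some.inj h
      · simp only [if_pos hc, if_neg hn] at h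
        have : ¬(((PySem.Dict.mk item).get? "current").getD "" ≠ "" ∧
            PySem.Str.strip (((PySem.Dict.mk item).get? "name").getD "") ≠ "") := fun hb => hn hb.2
        simp only [if_neg this]
        exact ih h _
    · simp only [if_neg hc] at h
      have : ¬(((PySem.Dict.mk item).get? "current").getD "" ≠ "" ∧
          PySem.Str.strip (((PySem.Dict.mk item).get? "name").getD "") ≠ "") := fun hb => hc hb.1
      simp only [if_neg this]
      exact ih h _

-- if A's first loop finds nothing, B returns the fallback if set, else A's second loop's result
theorem pvBLoop_of_loop1_none (branches : List (List (String × String)))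
    (h : pvALoop1 branches = none) :
    ∀ fb : Option String, pvBLoop branches fb = ((fb.or (pvALoop2 branches)).getD "") := by
  induction branches with
  | nil => intro fb; cases fb <;> simp [pvBLoop, pvALoop2]
  | cons item rest ih =>
    intro fb
    simp only [pvALoop1] at h
    simp only [pvBLoop, pvALoop2]
    by_cases hc : ((PySem.Dict.mk item).get? "current").getD "" ≠ ""
    · by_cases hn : PySem.Str.strip (((PySem.Dict.mk item).get? "name").getD "") ≠ ""
      · simp [if_pos hc, if_pos hn] at h
      · simp only [if_pos hc, if_neg hn] at h
        have hb : ¬(((PySem.Dict.mk item).get? "current").getD "" ≠ "" ∧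
            PySem.Str.strip (((PySem.Dict.mk item).get? "name").getD "") ≠ "") := fun hb => hn hb.2
        have hn' : ¬(PySem.Str.strip (((PySem.Dict.mk item).get? "name").getD "") ≠ "" ∧ fb = none) :=
          fun hb => hn hb.1
        simp only [if_neg hb, if_neg hn, if_neg hn']
        exact ih h fb
    · simp only [if_neg hc] at h
      have hb : ¬(((PySem.Dict.mk item).get? "current").getD "" ≠ "" ∧
          PySem.Str.strip (((PySem.Dict.mk item).get? "name").getD "") ≠ "") := fun hb => hc hb.1
      simp only [if_neg hb]
      by_cases hn : PySem.Str.strip (((PySem.Dict.mk item).get? "name").getD "") ≠ ""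
      · simp only [if_pos hn]
        cases fb with
        | none => rw [if_pos (And.intro hn rfl)]; simpa using ih h (some _)
        | some x =>
          have : ¬(PySem.Str.strip (((PySem.Dict.mk item).get? "name").getD "") ≠ "" ∧
              (some x : Option String) = none) := by intro hb; cases hb.2
          simp only [if_neg this]
          simpa using ih h (some x)
      · have hn' : ¬(PySem.Str.strip (((PySem.Dict.mk item).get? "name").getD "") ≠ "" ∧ fb = none) :=
          fun hb => hn hb.1
        simp only [if_neg hn, if_neg hn']
        exact ih h fb

-- ===== VERDICT (by name: the statement is the Claim_ definition above) =====
theorem resolve_base_branch_py_spec : Claim_equal_resolve_base_branch_py := by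
  intro branches _ _
  unfold Spec_resolve_base_branch_py resolve_base_branch_py resolve_base_branch_py_alt
  cases h : pvALoop1 branches with
  | some n => rw [pvBLoop_of_loop1_some branches n h none]
  | none =>
    rw [pvBLoop_of_loop1_none branches h none]
    cases h2 : pvALoop2 branches <;> simp
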